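-- pv_equiv track=rewrite | github.com/jcolinpatrick/kryptos | scripts/transposition/columnar/e_s_19_double_columnar.py | columnar_encrypt_perm
-- ===== SOURCE A (Python) =====
-- def columnar_encrypt_perm(n, width, col_order):
--     """Gather-convention permutation for columnar transposition.
--     output[i] = input[perm[i]]."""
--     perm = []
--     for col in col_order:
--         if n % width == 0:
--             col_len = n // width
--         elif col < (n % width):
--             col_len = (n // width) + 1
--         else:
--             col_len = n // width
--         for row in range(col_len):
--             perm.append(row * width + col)
--     return perm
-- ===== SOURCE B (Python) =====
-- def columnar_encrypt_perm(n, width, col_order):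
--     """Gather-convention permutation for columnar transposition.
--     output[i] = input[perm[i]].
--
--     Row-major scatter: walk the grid one row at a time, dropping each cell's
--     index into a per-column bucket (one bucket per col_order entry), then
--     flatten the buckets.  The last (partial) row holds only columns < n % width.
--     """
--     if not col_order:
--         return []
--     q, r = divmod(n, width)
--     buckets = [[] for _ in col_order]
--     for row in range(q + (1 if r else 0)):
--         base = row * width
--         for b, col in zip(buckets, col_order):
--             if row < q or col < r:
--                 b.append(base + col)
--     return [i for b in buckets for i in b]
-- ===== Notes on version B (the rewrite author's own statement) =====
-- stated objective: alternative
-- what changed: B replaces A's column-major nested loops (per-column remainder-based length then an inner row loop) by a row-major scatter: it walks the grid one row at a time, dropping each cell index into a per-column bucket (the last partial row keeps only columns < n % width), then flattens the buckets in col_order.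
import Mathlib
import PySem

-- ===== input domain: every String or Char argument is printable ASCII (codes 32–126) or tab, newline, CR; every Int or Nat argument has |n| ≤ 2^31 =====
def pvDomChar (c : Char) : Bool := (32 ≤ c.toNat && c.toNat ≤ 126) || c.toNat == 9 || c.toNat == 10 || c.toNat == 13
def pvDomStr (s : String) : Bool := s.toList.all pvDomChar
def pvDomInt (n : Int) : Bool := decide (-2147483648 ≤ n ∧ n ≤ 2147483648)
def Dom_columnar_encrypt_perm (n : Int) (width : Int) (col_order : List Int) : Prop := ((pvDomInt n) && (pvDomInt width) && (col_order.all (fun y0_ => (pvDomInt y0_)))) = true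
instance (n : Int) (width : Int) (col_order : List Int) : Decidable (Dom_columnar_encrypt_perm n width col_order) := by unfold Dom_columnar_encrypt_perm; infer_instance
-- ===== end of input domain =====

-- B replaces A's column-major nested loops by a row-major scatter into per-column
-- buckets followed by a flatten (objective: alternative decomposition, same cost).

-- ===== PORT A =====
def columnar_encrypt_perm (n : Int) (width : Int) (col_order : List Int) : List Int :=
  col_order.foldl (fun perm col =>
    let col_len : Int :=
      if PySem.Int.mod n width = 0 then PySem.Int.floordiv n width
      else if col < PySem.Int.mod n width then PySem.Int.floordiv n width + 1
      else PySem.Int.floordiv n width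
    (PySem.List.pyRange 0 col_len 1).foldl (fun perm row => perm ++ [row * width + col]) perm) []

-- ===== PORT B =====
def columnar_encrypt_perm_alt (n : Int) (width : Int) (col_order : List Int) : List Int :=
  if col_order = [] then []
  else
    let q := PySem.Int.floordiv n width
    let r := PySem.Int.mod n width
    let buckets : List (List Int) := col_order.map (fun _ => [])
    let buckets := (PySem.List.pyRange 0 (q + if r ≠ 0 then 1 else 0) 1).foldl
      (fun buckets row =>
        let base := row * width
        (buckets.zip col_order).map (fun bc =>
          if row < q ∨ bc.2 < r then bc.1 ++ [base + bc.2] else bc.1))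
      buckets
    buckets.flatten

-- ===== PRECONDITION & SPEC =====
-- Pre_ excludes exactly the inputs where Python A raises ZeroDivisionError:
-- width == 0 with a non-empty col_order (n % width is evaluated once per column).
def Pre_columnar_encrypt_perm (n : Int) (width : Int) (col_order : List Int) : Prop :=
  width ≠ 0 ∨ col_order = []
instance (n : Int) (width : Int) (col_order : List Int) : Decidable (Pre_columnar_encrypt_perm n width col_order) := by unfold Pre_columnar_encrypt_perm; infer_instance

def pvWitness_columnar_encrypt_perm : Int × Int × List Int := (7, 3, [2, 0, 1])

def Spec_columnar_encrypt_perm (n : Int) (width : Int) (col_order : List Int) (out : List Int) : Prop := out = columnar_encrypt_perm_alt n width col_order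
instance (n : Int) (width : Int) (col_order : List Int) (out : List Int) : Decidable (Spec_columnar_encrypt_perm n width col_order out) := by unfold Spec_columnar_encrypt_perm; infer_instance

-- ===== CLAIM (what is proved, stated in full; the proofs are below) =====
def Claim_equal_columnar_encrypt_perm : Prop := ∀ (n : Int) (width : Int) (col_order : List Int), Dom_columnar_encrypt_perm n width col_order → Pre_columnar_encrypt_perm n width col_order → Spec_columnar_encrypt_perm n width col_order (columnar_encrypt_perm n width col_order)

-- ===== LEMMAS AND PROOFS =====

-- A's per-column length, abbreviated for the proofs.
def pvColLen (n w col : Int) : Int :=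
  if PySem.Int.mod n w = 0 then PySem.Int.floordiv n w
  else if col < PySem.Int.mod n w then PySem.Int.floordiv n w + 1
  else PySem.Int.floordiv n w

-- A emits, per column, the map of its row range (general accumulator form).
theorem pvA_fold (n w : Int) (cols : List Int) (acc : List Int) :
    cols.foldl (fun perm col =>
      let col_len : Int :=
        if PySem.Int.mod n w = 0 then PySem.Int.floordiv n w
        else if col < PySem.Int.mod n w then PySem.Int.floordiv n w + 1
        else PySem.Int.floordiv n w
      (PySem.List.pyRange 0 col_len 1).foldl (fun perm row => perm ++ [row * w + col]) perm) acc
      = acc ++ cols.flatMap (fun col => (PySem.List.pyRange 0 (pvColLen n w col) 1).map (fun row => row * w + col)) := by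
  induction cols generalizing acc with
  | nil => simp
  | cons c t ih =>
      simp only [List.foldl_cons, List.flatMap_cons]
      rw [PySem.List.foldl_append_singleton_eq_map, ih, List.append_assoc]
      rfl

-- A emits, per column, the map of its row range.
theorem pvA_flatMap (n w : Int) (cols : List Int) :
    columnar_encrypt_perm n w cols
      = cols.flatMap (fun col => (PySem.List.pyRange 0 (pvColLen n w col) 1).map (fun row => row * w + col)) := by
  unfold columnar_encrypt_perm
  rw [pvA_fold, List.nil_append]

-- Zipping a mapped list with its source pairs each element with its image.
theorem pvZipMap (init : Int → List Int) (cols : List Int) :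
    (cols.map init).zip cols = cols.map (fun c => (init c, c)) := by
  induction cols with
  | nil => simp
  | cons c cs ihc => simp [ihc]

-- Row-major scatter into buckets equals per-column filtered rows.
theorem pvScatter (rows cols : List Int) (f : Int → Int → Int) (p : Int → Int → Prop)
    [inst : ∀ a b, Decidable (p a b)] (init : Int → List Int) :
    rows.foldl (fun bs row =>
        (bs.zip cols).map (fun bc => if p row bc.2 then bc.1 ++ [f row bc.2] else bc.1))
      (cols.map init)
    = cols.map (fun col => init col ++ (rows.filter (fun row => decide (p row col))).map (fun row => f row col)) := by
  induction rows generalizing init with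
  | nil => simp
  | cons row rows ih =>
      simp only [List.foldl_cons]
      have hstep : ((cols.map init).zip cols).map
            (fun bc => if p row bc.2 then bc.1 ++ [f row bc.2] else bc.1)
          = cols.map (fun c => if p row c then init c ++ [f row c] else init c) := by
        rw [pvZipMap, List.map_map]
        rfl
      rw [hstep, ih (fun c => if p row c then init c ++ [f row c] else init c)]
      apply List.map_congr_left
      intro c _
      by_cases h : p row c <;> simp [h]

-- The filtered row range is exactly A's per-column row range.
theorem pvFilter_rows (n w col : Int) :
    (PySem.List.pyRange 0 (PySem.Int.floordiv n w + if PySem.Int.mod n w ≠ 0 then 1 else 0) 1).filter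
        (fun row => decide (row < PySem.Int.floordiv n w ∨ col < PySem.Int.mod n w))
      = PySem.List.pyRange 0 (pvColLen n w col) 1 := by
  set q := PySem.Int.floordiv n w with hq
  set r := PySem.Int.mod n w with hr
  unfold pvColLen
  rw [← hq, ← hr]
  by_cases hr0 : r = 0
  · simp only [hr0, ne_eq, not_true_eq_false, if_false, add_zero]
    apply List.filter_eq_self.mpr
    intro row hrow
    have := (PySem.List.mem_pyRange_one).mp hrow
    simp only [decide_eq_true_eq]
    left; omega
  · simp only [ne_eq, hr0, not_false_eq_true, if_true]
    by_cases hcol : col < r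
    · rw [if_pos hcol]
      apply List.filter_eq_self.mpr
      intro row _
      simp [hcol]
    · rw [if_neg hcol]
      by_cases hqn : 0 ≤ q
      · rw [PySem.List.pyRange_one_succ_right (by omega)]
        rw [List.filter_append]
        have h1 : (PySem.List.pyRange 0 q 1).filter
            (fun row => decide (row < q ∨ col < r)) = PySem.List.pyRange 0 q 1 := by
          apply List.filter_eq_self.mpr
          intro row hrow
          have := (PySem.List.mem_pyRange_one).mp hrow
          simp only [decide_eq_true_eq]
          left; omega
        have h2 : ([q] : List Int).filter (fun row => decide (row < q ∨ col < r)) = [] := by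
          simp [hcol]
        rw [h1, h2, List.append_nil]
        simp
      · rw [PySem.List.pyRange_one_eq_nil (by omega), PySem.List.pyRange_one_eq_nil (by omega)]
        simp

-- ===== VERDICT (by name: the statement is the Claim_ definition above) =====
theorem columnar_encrypt_perm_spec : Claim_equal_columnar_encrypt_perm := by
  intro n width col_order _ hpre
  unfold Spec_columnar_encrypt_perm
  rcases eq_or_ne col_order [] with hnil | hne
  · subst hnil; rfl
  · have hw : width ≠ 0 := by
      rcases hpre with h | h
      · exact h
      · exact absurd h hne
    unfold columnar_encrypt_perm_alt
    rw [if_neg hne]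
    simp only [pvScatter (PySem.List.pyRange 0 (PySem.Int.floordiv n width + if PySem.Int.mod n width ≠ 0 then 1 else 0) 1)
        col_order (fun row col => row * width + col)
        (fun row col => row < PySem.Int.floordiv n width ∨ col < PySem.Int.mod n width)
        (fun _ => ([] : List Int))]
    rw [pvA_flatMap n width col_order, List.flatMap_def]
    congr 1
    apply List.map_congr_left
    intro col _
    rw [List.nil_append, ← pvFilter_rows n width col]
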